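-- pv_equiv track=rewrite | github.com/Sarika-Gadhe/Python_Programs | Program629.py | CountDigitX
-- ===== SOURCE A (Python) =====
-- def CountDigitX(iNo):
--
--     iDigit = 0
--     iCount4 = 0
--     iCount5 = 0
--     iCount7 = 0
--
--     while(iNo != 0):
--         iDigit = iNo % 10
--         if(iDigit == 4):
--             iCount4+=1
--         elif(iDigit == 5):
--             iCount5+=1
--         elif(iDigit == 7):
--             iCount7+=1
--         iNo = iNo // 10
--
--     return iCount4,iCount5,iCount7
-- ===== SOURCE B (Python) =====
-- def CountDigitX(iNo):
--     s = str(iNo)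
--     return s.count('4'), s.count('5'), s.count('7')
-- ===== Notes on version B (the rewrite author's own statement) =====
-- stated objective: idiomatic
-- what changed: Replaces the modulo/floor-division digit-peeling while-loop with one str() conversion and three string count scans.
import Mathlib
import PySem

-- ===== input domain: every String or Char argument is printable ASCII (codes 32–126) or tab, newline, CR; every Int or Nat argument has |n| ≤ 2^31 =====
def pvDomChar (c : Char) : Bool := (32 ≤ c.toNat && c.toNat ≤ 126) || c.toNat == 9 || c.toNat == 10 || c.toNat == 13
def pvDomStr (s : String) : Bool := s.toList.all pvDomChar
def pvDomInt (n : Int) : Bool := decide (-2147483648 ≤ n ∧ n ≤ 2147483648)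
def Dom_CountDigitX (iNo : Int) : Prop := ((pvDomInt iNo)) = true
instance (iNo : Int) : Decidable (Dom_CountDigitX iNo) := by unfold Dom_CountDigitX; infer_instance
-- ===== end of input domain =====

-- B replaces the digit-peeling while-loop by str(iNo) plus three character-count scans (idiomatic, same cost).

-- ===== PORT A =====
-- A's while-loop; fuel bounds the iterations (iNo.natAbs + 1 is enough for every
-- non-negative iNo; on negative iNo the Python loop never terminates, excluded by Pre_).
def CountDigitXLoop : Nat → Int → Int × Int × Int → Int × Int × Int
  | 0, _, acc => acc
  | fuel + 1, n, (c4, c5, c7) =>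
    if n = 0 then (c4, c5, c7)
    else
      let d := PySem.Int.mod n 10
      let acc' : Int × Int × Int :=
        if d = 4 then (c4 + 1, c5, c7)
        else if d = 5 then (c4, c5 + 1, c7)
        else if d = 7 then (c4, c5, c7 + 1)
        else (c4, c5, c7)
      CountDigitXLoop fuel (PySem.Int.floordiv n 10) acc'

def CountDigitX (iNo : Int) : Int × Int × Int :=
  CountDigitXLoop (iNo.natAbs + 1) iNo (0, 0, 0)

-- ===== PORT B =====
def CountDigitX_alt (iNo : Int) : Int × Int × Int :=
  let s := PySem.Int.toStr iNo
  ((PySem.Str.count s "4" : Int), (PySem.Str.count s "5" : Int), (PySem.Str.count s "7" : Int))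

-- ===== PRECONDITION & SPEC =====
-- Pre_ excludes negative inputs: there A's while-loop never terminates (floor division keeps the value stuck below zero), so A never returns.
def Pre_CountDigitX (iNo : Int) : Prop := 0 ≤ iNo
instance (iNo : Int) : Decidable (Pre_CountDigitX iNo) := by unfold Pre_CountDigitX; infer_instance
def pvWitness_CountDigitX : Int := 4757

def Spec_CountDigitX (iNo : Int) (out : Int × Int × Int) : Prop := out = CountDigitX_alt iNo
instance (iNo : Int) (out : Int × Int × Int) : Decidable (Spec_CountDigitX iNo out) := by unfold Spec_CountDigitX; infer_instance

-- ===== CLAIM (what is proved, stated in full; the proofs are below) =====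
def Claim_equal_CountDigitX : Prop := ∀ (iNo : Int), Dom_CountDigitX iNo → Pre_CountDigitX iNo → Spec_CountDigitX iNo (CountDigitX iNo)

-- ===== LEMMAS AND PROOFS =====

-- count of decimal digit d in m (0 for m = 0), the common reference of both sides
def digCnt (d : Nat) (m : Nat) : Nat :=
  if m = 0 then 0 else (if m % 10 = d then 1 else 0) + digCnt d (m / 10)
decreasing_by exact Nat.div_lt_self (Nat.pos_of_ne_zero (by assumption)) (by norm_num)

lemma digCnt_succ (d m : Nat) (h : m ≠ 0) :
    digCnt d m = (if m % 10 = d then 1 else 0) + digCnt d (m / 10) := by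
  rw [digCnt, if_neg h]

lemma loop_spec : ∀ (fuel m : Nat), m < fuel → ∀ c4 c5 c7 : Int,
    CountDigitXLoop fuel (m : Int) (c4, c5, c7)
      = (c4 + digCnt 4 m, c5 + digCnt 5 m, c7 + digCnt 7 m) := by
  intro fuel
  induction fuel with
  | zero => omega
  | succ f ih =>
    intro m hm c4 c5 c7
    by_cases h0 : m = 0
    · subst h0
      simp [CountDigitXLoop, digCnt]
    · have hmod : PySem.Int.mod (m : Int) 10 = ((m % 10 : Nat) : Int) := PySem.Int.mod_natCast m 10
      have hdiv : PySem.Int.floordiv (m : Int) 10 = ((m / 10 : Nat) : Int) := PySem.Int.floordiv_natCast m 10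
      have hlt : m / 10 < f := by
        have := Nat.div_lt_self (Nat.pos_of_ne_zero h0) (by norm_num : 1 < 10)
        omega
      have hne : (m : Int) ≠ 0 := by exact_mod_cast h0
      rw [show CountDigitXLoop (f + 1) (m : Int) (c4, c5, c7)
            = (if (m : Int) = 0 then (c4, c5, c7)
               else
                 let d := PySem.Int.mod (m : Int) 10
                 let acc' : Int × Int × Int :=
                   if d = 4 then (c4 + 1, c5, c7)
                   else if d = 5 then (c4, c5 + 1, c7)
                   else if d = 7 then (c4, c5, c7 + 1)
                   else (c4, c5, c7)
                 CountDigitXLoop f (PySem.Int.floordiv (m : Int) 10) acc') from rfl]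
      rw [if_neg hne, hmod, hdiv]
      rw [digCnt_succ 4 m h0, digCnt_succ 5 m h0, digCnt_succ 7 m h0]
      show CountDigitXLoop f ((m / 10 : Nat) : Int)
            (if ((m % 10 : Nat) : Int) = 4 then (c4 + 1, c5, c7)
             else if ((m % 10 : Nat) : Int) = 5 then (c4, c5 + 1, c7)
             else if ((m % 10 : Nat) : Int) = 7 then (c4, c5, c7 + 1)
             else (c4, c5, c7)) = _
      simp only [show ((m % 10 : Nat) : Int) = 4 ↔ m % 10 = 4 from by omega,
        show ((m % 10 : Nat) : Int) = 5 ↔ m % 10 = 5 from by omega,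
        show ((m % 10 : Nat) : Int) = 7 ↔ m % 10 = 7 from by omega]
      split_ifs with h4 h5 h7 <;> rw [ih _ hlt] <;> push_cast <;>
        simp only [Prod.mk.injEq] <;> refine ⟨by omega, by omega, by omega⟩

-- Chars.count with a single-character needle is List.count
lemma go_single : ∀ (fuel : Nat) (c : Char) (l : List Char) (acc : Nat), l.length ≤ fuel →
    PySem.Chars.count.go [c] fuel l acc = acc + l.count c := by
  intro fuel
  induction fuel with
  | zero =>
    intro c l acc h
    have : l = [] := List.length_eq_zero_iff.mp (Nat.le_zero.mp h)
    subst this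
    simp [PySem.Chars.count.go]
  | succ f ih =>
    intro c l acc h
    cases l with
    | nil => simp [PySem.Chars.count.go]
    | cons x t =>
      rw [show PySem.Chars.count.go [c] (f + 1) (x :: t) acc
            = (if [c].isPrefixOf (x :: t) then
                 PySem.Chars.count.go [c] f (List.drop [c].length (x :: t)) (acc + 1)
               else PySem.Chars.count.go [c] f t acc) from rfl]
      have hlen : t.length ≤ f := by simpa using h
      by_cases hx : c = x
      · subst hx
        rw [if_pos (by simp [List.isPrefixOf])]
        simp only [List.length_singleton, List.drop_one, List.tail_cons]
        rw [ih _ _ _ hlen]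
        simp
        omega
      · have hpre : ([c].isPrefixOf (x :: t)) = false := by
          simp [List.isPrefixOf]
          exact fun h' => hx h'
        rw [if_neg (by simp [hpre])]
        rw [ih _ _ _ hlen]
        have hcx : (x == c) = false := by
          simp only [beq_eq_false_iff_ne]
          exact fun h' => hx h'.symm
        rw [List.count_cons, hcx]
        simp

lemma count_single (cs : List Char) (c : Char) :
    PySem.Chars.count cs [c] = cs.count c := by
  rw [show PySem.Chars.count cs [c] = PySem.Chars.count.go [c] cs.length cs 0 from rfl]
  rw [go_single cs.length c cs 0 (le_refl _)]
  omega

-- count of digitChar d in toDigitsCore, for a nonzero digit d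
lemma digitChar_beq_iff (k d : Nat) (hk : k < 10) (hd9 : d < 10) :
    ((Nat.digitChar k == Nat.digitChar d) = true) ↔ k = d := by
  interval_cases k <;> interval_cases d <;> simp <;> decide

lemma toDigitsCore_count (d : Nat) (hd9 : d < 10) :
    ∀ (fuel n : Nat) (ds : List Char), n < fuel →
    (Nat.toDigitsCore 10 fuel n ds).count (Nat.digitChar d)
      = (if n % 10 = d then 1 else 0) + digCnt d (n / 10) + ds.count (Nat.digitChar d) := by
  intro fuel
  induction fuel with
  | zero => omega
  | succ f ih =>
    intro n ds hn
    rw [Nat.toDigitsCore]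
    have h10 : n % 10 < 10 := Nat.mod_lt n (by norm_num)
    by_cases h0 : n / 10 = 0
    · rw [if_pos h0, h0]
      have hz : digCnt d 0 = 0 := by rw [digCnt]; simp
      rw [hz, List.count_cons]
      rw [if_congr (digitChar_beq_iff (n % 10) d h10 hd9) rfl rfl]
      split_ifs <;> omega
    · rw [if_neg h0]
      rw [ih _ _ (by omega : n / 10 < f)]
      rw [List.count_cons]
      rw [digCnt_succ d (n / 10) h0]
      rw [if_congr (digitChar_beq_iff (n % 10) d h10 hd9) rfl rfl]
      split_ifs <;> omega

lemma toDigits_count (d m : Nat) (hd : 0 < d) (hd9 : d < 10) :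
    (Nat.toDigits 10 m).count (Nat.digitChar d) = digCnt d m := by
  rw [show Nat.toDigits 10 m = Nat.toDigitsCore 10 (m + 1) m [] from rfl]
  rw [toDigitsCore_count d hd9 (m + 1) m [] (Nat.lt_succ_self m)]
  simp only [List.count_nil, Nat.add_zero]
  by_cases h0 : m = 0
  · subst h0
    rw [if_neg (by omega)]
    rw [show (0 : Nat) / 10 = 0 from rfl]
    rw [show digCnt d 0 = 0 from by rw [digCnt]; simp]
  · rw [digCnt_succ d m h0]

-- ===== VERDICT (by name: the statement is the Claim_ definition above) =====
theorem CountDigitX_spec : Claim_equal_CountDigitX := by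
  intro iNo _ hpre
  unfold Spec_CountDigitX CountDigitX CountDigitX_alt
  obtain ⟨m, rfl⟩ : ∃ m : Nat, iNo = (m : Int) := ⟨iNo.toNat, (Int.toNat_of_nonneg hpre).symm⟩
  rw [loop_spec (Int.natAbs (m : Int) + 1) m (by simp) 0 0 0]
  show _ = (((PySem.Str.count (PySem.Int.toStr (m : Int)) "4" : Nat) : Int),
            ((PySem.Str.count (PySem.Int.toStr (m : Int)) "5" : Nat) : Int),
            ((PySem.Str.count (PySem.Int.toStr (m : Int)) "7" : Nat) : Int))
  have hs : (PySem.Int.toStr (m : Int)).toList = Nat.toDigits 10 m := by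
    rw [PySem.Int.toList_toStr]
    simp [PySem.Int.toChars, show ¬ ((m : Int) < 0) by omega]
  have hc : ∀ (d : Nat), 0 < d → d < 10 → ∀ t : String, t.toList = [Nat.digitChar d] →
      PySem.Str.count (PySem.Int.toStr (m : Int)) t = digCnt d m := by
    intro d hd hd9 t ht
    rw [PySem.Str.count_eq, hs, ht, count_single, toDigits_count d m hd hd9]
  rw [hc 4 (by norm_num) (by norm_num) "4" (by decide),
      hc 5 (by norm_num) (by norm_num) "5" (by decide),
      hc 7 (by norm_num) (by norm_num) "7" (by decide)]
  simp
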